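-- pv_equiv track=rewrite | github.com/hujh14/placeholder | hand.py | hasFlushDraw
-- ===== SOURCE A (Python) =====
-- def hasFlushDraw(suits):
--     h, d, c, s = 0, 0, 0, 0
--     if len(suits) == 7:
--         return False
--     for card in suits:
--         if card == 'h':
--             h += 1
--         elif card == 's':
--             s += 1
--         elif card == 'd':
--             d += 1
--         elif card == 'c':
--             c += 1
--     return h > 3 or c > 3 or s > 3 or d > 3
-- ===== SOURCE B (Python) =====
-- def hasFlushDraw(suits):
--     if len(suits) == 7:
--         return False
--     xs = sorted(suits)
--     for i in range(len(xs) - 3):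
--         if xs[i] == xs[i + 3] and xs[i] in ('h', 'c', 'd', 's'):
--             return True
--     return False
-- ===== Notes on version B (the rewrite author's own statement) =====
-- stated objective: alternative
-- what changed: Replaces per-suit counting (four accumulators and a >3 test) with sort-then-window-scan: after sorting, a suit occurs more than three times iff some element equals the element three positions later, so B sorts and looks for such a window whose value is a valid suit.
import Mathlib
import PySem

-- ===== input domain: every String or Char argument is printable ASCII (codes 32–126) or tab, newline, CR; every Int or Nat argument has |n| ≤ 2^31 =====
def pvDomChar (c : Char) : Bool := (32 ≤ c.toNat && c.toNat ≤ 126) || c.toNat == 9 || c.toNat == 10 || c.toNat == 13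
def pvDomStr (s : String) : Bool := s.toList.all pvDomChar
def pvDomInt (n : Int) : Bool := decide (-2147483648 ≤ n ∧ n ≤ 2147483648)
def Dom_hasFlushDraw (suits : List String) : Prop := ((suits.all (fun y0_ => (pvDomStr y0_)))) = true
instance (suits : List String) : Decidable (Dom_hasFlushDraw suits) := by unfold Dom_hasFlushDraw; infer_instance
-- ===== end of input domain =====

-- B sorts the hand and scans for an element equal to the one three positions later
-- (a valid suit occurring more than three times), instead of A's four accumulators (objective: alternative).

-- ===== PORT A =====
def hasFlushDraw (suits : List String) : Bool :=
  if suits.length == 7 then false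
  else
    let st := suits.foldl (fun (st : Int × Int × Int × Int) card =>
      let (h, d, c, s) := st
      if card == "h" then (h + 1, d, c, s)
      else if card == "s" then (h, d, c, s + 1)
      else if card == "d" then (h, d + 1, c, s)
      else if card == "c" then (h, d, c + 1, s)
      else (h, d, c, s)) ((0, 0, 0, 0) : Int × Int × Int × Int)
    st.1 > 3 || st.2.2.1 > 3 || st.2.2.2 > 3 || st.2.1 > 3

-- ===== PORT B =====
def hasFlushDraw_alt (suits : List String) : Bool :=
  if suits.length == 7 then false
  else
    let xs := PySem.List.sorted suits (fun x => x) false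
    (List.range (xs.length - 3)).any (fun i =>
      xs.getD i "" == xs.getD (i + 3) "" &&
      (xs.getD i "" == "h" || xs.getD i "" == "c" || xs.getD i "" == "d" || xs.getD i "" == "s"))

-- ===== PRECONDITION & SPEC =====
def Spec_hasFlushDraw (suits : List String) (out : Bool) : Prop := out = hasFlushDraw_alt suits
instance (suits : List String) (out : Bool) : Decidable (Spec_hasFlushDraw suits out) := by unfold Spec_hasFlushDraw; infer_instance

-- ===== CLAIM (what is proved, stated in full; the proofs are below) =====
def Claim_equal_hasFlushDraw : Prop := ∀ (suits : List String), Dom_hasFlushDraw suits → Spec_hasFlushDraw suits (hasFlushDraw suits)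

-- ===== LEMMAS AND PROOFS =====

-- A's fold computes the four counts.
theorem foldl_counts (suits : List String) (h d c s : Int) :
    suits.foldl (fun (st : Int × Int × Int × Int) card =>
      let (h, d, c, s) := st
      if card == "h" then (h + 1, d, c, s)
      else if card == "s" then (h, d, c, s + 1)
      else if card == "d" then (h, d + 1, c, s)
      else if card == "c" then (h, d, c + 1, s)
      else (h, d, c, s)) (h, d, c, s)
    = (h + suits.count "h", d + suits.count "d", c + suits.count "c", s + suits.count "s") := by
  induction suits generalizing h d c s with
  | nil => simp
  | cons x xs ih =>
    simp only [List.foldl_cons, List.count_cons]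
    by_cases hx : x = "h" <;> by_cases hs : x = "s" <;> by_cases hd : x = "d" <;> by_cases hc : x = "c" <;>
      simp_all <;> ring

-- In a sorted list all of whose elements are ≥ v, the first (count v) elements are v.
theorem sorted_prefix_eq (v : String) :
    ∀ (xs : List String) (k : Nat), xs.Pairwise (· ≤ ·) → (∀ y ∈ xs, v ≤ y) →
      k < xs.count v → xs.getD k "" = v := by
  intro xs
  induction xs with
  | nil => intro k _ _ hk; simp at hk
  | cons a t ih =>
    intro k hp hge hk
    have hav : a = v := by
      by_contra hne
      have hva : v < a := lt_of_le_of_ne (hge a (by simp)) (Ne.symm hne)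
      have h0 : (a :: t).count v = 0 := by
        rw [List.count_eq_zero]
        intro hv
        rcases List.mem_cons.mp hv with h | h
        · exact hne h.symm
        · exact absurd ((List.pairwise_cons.mp hp).1 v h) (not_le.mpr hva)
      omega
    cases k with
    | zero => simpa using hav
    | succ k =>
      have hpt := (List.pairwise_cons.mp hp).2
      have hgt : ∀ y ∈ t, v ≤ y := fun y hy => hge y (by simp [hy])
      have hct : k < t.count v := by
        simp [hav] at hk
        omega
      simpa using ih k hpt hgt hct

-- If v occurs at least 4 times in a sorted list, some window of width 3 is constant v.
theorem sorted_count_window (v : String) :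
    ∀ (xs : List String), xs.Pairwise (· ≤ ·) → 4 ≤ xs.count v →
      ∃ i, i + 3 < xs.length ∧ xs.getD i "" = v ∧ xs.getD (i + 3) "" = v := by
  intro xs
  induction xs with
  | nil => intro _ hc; simp at hc
  | cons a t ih =>
    intro hp hc
    by_cases hav : a = v
    · have hge : ∀ y ∈ a :: t, v ≤ y := by
        intro y hy
        rcases List.mem_cons.mp hy with h | h
        · simp [h, hav]
        · exact hav ▸ (List.pairwise_cons.mp hp).1 y h
      refine ⟨0, ?_, ?_, ?_⟩
      · have := List.count_le_length (l := a :: t) (a := v); simp at this ⊢; omega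
      · exact sorted_prefix_eq v (a :: t) 0 hp hge (by omega)
      · exact sorted_prefix_eq v (a :: t) 3 hp hge (by omega)
    · have hct : 4 ≤ t.count v := by simp [hav] at hc; omega
      obtain ⟨i, hi, h1, h2⟩ := ih (List.pairwise_cons.mp hp).2 hct
      exact ⟨i + 1, by simp; omega, by simpa using h1, by simpa using h2⟩

-- Conversely, a constant window of width 3 in a sorted list gives count ≥ 4.
theorem window_count (xs : List String) (i : Nat) (hp : xs.Pairwise (· ≤ ·))
    (hlen : i + 3 < xs.length) (heq : xs.getD i "" = xs.getD (i + 3) "") :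
    4 ≤ xs.count (xs.getD i "") := by
  have hi : i < xs.length := by omega
  have mono : ∀ p q, ∀ (hpq : p ≤ q) (hq : q < xs.length), xs[p]'(by omega) ≤ xs[q] := by
    intro p q hpq hq
    rcases lt_or_eq_of_le hpq with h | h
    · exact List.pairwise_iff_getElem.mp hp p q (by omega) hq h
    · subst h; exact le_refl _
  have hdv : xs[i] = xs.getD i "" := (List.getD_eq_getElem xs "" hi).symm
  have heq' : xs[i] = xs[i + 3]'hlen := by
    rw [List.getD_eq_getElem xs "" hi, List.getD_eq_getElem xs "" hlen] at heq
    exact heq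
  have hvals : ∀ j, ∀ (h1 : i ≤ j) (h2 : j ≤ i + 3), xs[j]'(by omega) = xs[i] := by
    intro j h1 h2
    have l1 : xs[i] ≤ xs[j]'(by omega) := mono i j h1 (by omega)
    have l2 : xs[j]'(by omega) ≤ xs[i + 3]'hlen := mono j (i + 3) h2 hlen
    exact le_antisymm (heq' ▸ l2) l1
  have htake : (xs.drop i).take 4 = List.replicate 4 (xs.getD i "") := by
    apply List.ext_getElem
    · simp; omega
    · intro j hj1 hj2
      have hj4 : j < 4 := by simp at hj1; omega
      rw [List.getElem_take, List.getElem_drop, List.getElem_replicate]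
      exact (hvals (i + j) (by omega) (by omega)).trans hdv
  have c1 : ((xs.drop i).take 4).count (xs.getD i "") = 4 := by rw [htake]; simp
  have c2 : ((xs.drop i).take 4).count (xs.getD i "") ≤ (xs.drop i).count (xs.getD i "") :=
    (List.take_sublist 4 (xs.drop i)).count_le _
  have c3 : (xs.drop i).count (xs.getD i "") ≤ xs.count (xs.getD i "") :=
    (List.drop_sublist i xs).count_le _
  omega

-- ===== VERDICT (by name: the statement is the Claim_ definition above) =====
theorem hasFlushDraw_spec : Claim_equal_hasFlushDraw := by
  intro suits _
  unfold Spec_hasFlushDraw hasFlushDraw hasFlushDraw_alt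
  by_cases h7 : suits.length = 7
  · simp [h7]
  · have hb : (suits.length == 7) = false := by simp [h7]
    simp only [hb, Bool.false_eq_true, if_false, foldl_counts, zero_add]
    set xs := PySem.List.sorted suits (fun x => x) false with hxs
    have hperm : xs.Perm suits := PySem.List.sorted_perm suits (fun x => x) false
    have hpair : xs.Pairwise (· ≤ ·) := by
      have := PySem.List.sorted_pairwise (xs := suits) (key := fun x => x)
      simpa [hxs] using this
    rw [Bool.eq_iff_iff]
    simp only [List.any_eq_true, List.mem_range, Bool.and_eq_true, Bool.or_eq_true,
      decide_eq_true_eq, beq_iff_eq]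
    constructor
    · intro h
      have key : ∃ v, (((v = "h" ∨ v = "c") ∨ v = "d") ∨ v = "s") ∧ 4 ≤ suits.count v := by
        rcases h with ((h | h) | h) | h
        · exact ⟨"h", Or.inl (Or.inl (Or.inl rfl)), by exact_mod_cast h⟩
        · exact ⟨"c", Or.inl (Or.inl (Or.inr rfl)), by exact_mod_cast h⟩
        · exact ⟨"s", Or.inr rfl, by exact_mod_cast h⟩
        · exact ⟨"d", Or.inl (Or.inr rfl), by exact_mod_cast h⟩
      obtain ⟨v, hv, hc⟩ := key
      have hcx : 4 ≤ xs.count v := by rw [hperm.count_eq]; exact hc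
      obtain ⟨i, hilen, h1, h2⟩ := sorted_count_window v xs hpair hcx
      refine ⟨i, by omega, by rw [h1, h2], ?_⟩
      rw [h1]; exact hv
    · rintro ⟨i, hi, heq, hmem⟩
      have hilen : i + 3 < xs.length := by omega
      have h4 : 4 ≤ xs.count (xs.getD i "") := window_count xs i hpair hilen heq
      have h4' : 4 ≤ suits.count (xs.getD i "") := by rw [← hperm.count_eq]; exact h4
      rcases hmem with ((h | h) | h) | h
      · exact Or.inl (Or.inl (Or.inl (by rw [h] at h4'; exact_mod_cast h4')))
      · exact Or.inl (Or.inl (Or.inr (by rw [h] at h4'; exact_mod_cast h4')))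
      · exact Or.inr (by rw [h] at h4'; exact_mod_cast h4')
      · exact Or.inl (Or.inr (by rw [h] at h4'; exact_mod_cast h4'))
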